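-- pv_equiv track=rewrite | github.com/dduivenbode/aoc-2021 | src/exercises/Day 15 - Chiton/solution.py | multiply_lines
-- ===== SOURCE A (Python) =====
-- import copy
--
-- def multiply_lines(lines):
--     nl1 = []
--     nl2 = []
--     for line in lines:
--         s = ''
--         for i in range(4):
--             for c in line:
--                 if int(c) + i == 9:
--                     s += '1'
--                 elif int(c) + i > 9:
--                     s += str((int(c) + i) % 8)
--                 else:
--                     s += str(int(c) + i + 1)
--         line += s
--         nl1.append(line)
--
--     nl2 = copy.deepcopy(nl1)
--
--     for i in range(4):
--         for line in nl1:
--             s = ''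
--             for c in line:
--                 if int(c) + i == 9:
--                     s += '1'
--                 elif int(c) + i > 9:
--                     s += str((int(c) + i) % 8)
--                 else:
--                     s += str(int(c) + i + 1)
--             nl2.append(s)
--     return nl2
-- ===== SOURCE B (Python) =====
-- def multiply_lines(lines):
--     out = []
--     for tr in range(5):
--         for row in lines:
--             nr = []
--             for tc in range(5):
--                 for c in row:
--                     v = int(c) + tr + tc
--                     while v > 9:
--                         v -= 9
--                     nr.append(str(v))
--             out.append(''.join(nr))
--     return out
-- ===== Notes on version B (the rewrite author's own statement) =====
-- stated objective: simpler
-- what changed: Replaces A's two-phase expansion (build widened lines with a three-branch wrap rule, deepcopy, then derive vertical blocks from the already-widened rows) with one unified pass that computes every output cell directly from the original input as int(c)+tr+tc reduced by a while-subtract-9 loop.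
import Mathlib
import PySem

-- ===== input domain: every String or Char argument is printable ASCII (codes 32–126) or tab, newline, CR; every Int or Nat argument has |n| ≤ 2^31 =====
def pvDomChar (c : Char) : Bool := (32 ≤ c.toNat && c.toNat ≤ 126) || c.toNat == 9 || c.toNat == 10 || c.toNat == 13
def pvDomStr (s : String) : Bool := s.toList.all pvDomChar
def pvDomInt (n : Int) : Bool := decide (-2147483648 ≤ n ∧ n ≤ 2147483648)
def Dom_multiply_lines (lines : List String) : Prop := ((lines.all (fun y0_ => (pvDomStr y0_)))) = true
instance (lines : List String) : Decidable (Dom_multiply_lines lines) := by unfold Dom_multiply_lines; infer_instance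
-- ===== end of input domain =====

-- B replaces A's two-phase expansion (widen every line with a three-branch wrap rule, deepcopy,
-- then derive the four vertical blocks from the widened rows) with a single unified pass computing
-- every output cell directly from the original input; same cost, simpler decomposition.

-- ===== PORT A =====
-- int(c) for a single character c (Pre_ restricts to digit characters, where it is some)
def pvCharInt (c : Char) : Int := (PySem.Int.ofChars? [c]).getD 0

-- the loop body A writes twice verbatim: the three-branch cell rule for shift i
def pvCellA (c : Char) (i : Int) : List Char :=
  if pvCharInt c + i = 9 then ['1']
  else if pvCharInt c + i > 9 then PySem.Int.toChars (PySem.Int.mod (pvCharInt c + i) 8)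
  else PySem.Int.toChars (pvCharInt c + i + 1)

def multiply_lines (lines : List String) : List String :=
  let nl1 := lines.foldl (fun nl1 line =>
    let s := (PySem.List.pyRange 0 4 1).foldl (fun s i =>
      line.toList.foldl (fun s c => s ++ pvCellA c i) s) []
    nl1 ++ [String.ofList (line.toList ++ s)]) []
  let nl2 := nl1
  (PySem.List.pyRange 0 4 1).foldl (fun nl2 i =>
    nl1.foldl (fun nl2 line =>
      let s := line.toList.foldl (fun s c => s ++ pvCellA c i) []
      nl2 ++ [String.ofList s]) nl2) nl2

-- ===== PORT B =====
-- 'while v > 9: v -= 9'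
def pvReduce (v : Int) : Int :=
  if v > 9 then pvReduce (v - 9) else v
termination_by v.toNat
decreasing_by omega

def multiply_lines_alt (lines : List String) : List String :=
  (PySem.List.pyRange 0 5 1).foldl (fun out tr =>
    lines.foldl (fun out row =>
      let nr := (PySem.List.pyRange 0 5 1).foldl (fun nr tc =>
        row.toList.foldl (fun nr c =>
          nr ++ PySem.Int.toChars (pvReduce (pvCharInt c + tr + tc))) nr) []
      out ++ [String.ofList nr]) out) []

-- ===== PRECONDITION & SPEC =====
-- A calls int(c) on every character of every line: a non-digit character raises ValueError.
def Pre_multiply_lines (lines : List String) : Prop :=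
  (lines.all (fun line => line.toList.all Char.isDigit)) = true
instance (lines : List String) : Decidable (Pre_multiply_lines lines) := by
  unfold Pre_multiply_lines; infer_instance
def pvWitness_multiply_lines : List String := ["08", "19"]

def Spec_multiply_lines (lines : List String) (out : List String) : Prop := out = multiply_lines_alt lines
instance (lines : List String) (out : List String) : Decidable (Spec_multiply_lines lines out) := by unfold Spec_multiply_lines; infer_instance

-- ===== CLAIM (what is proved, stated in full; the proofs are below) =====
def Claim_equal_multiply_lines : Prop := ∀ (lines : List String), Dom_multiply_lines lines → Pre_multiply_lines lines → Spec_multiply_lines lines (multiply_lines lines)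

-- ===== LEMMAS AND PROOFS =====

theorem pvReduce_of_le (v : Int) (h : v ≤ 9) : pvReduce v = v := by
  rw [pvReduce]; simp [show ¬ v > 9 by omega]

theorem pvReduce_of_mid (v : Int) (h1 : 9 < v) (h2 : v ≤ 18) : pvReduce v = v - 9 := by
  rw [pvReduce]; simp only [h1, if_pos]; exact pvReduce_of_le _ (by omega)

theorem digit_enum (c : Char) (h : c.isDigit = true) :
    c ∈ (['0','1','2','3','4','5','6','7','8','9'] : List Char) := by
  have h1 : 48 ≤ c.toNat ∧ c.toNat ≤ 57 := by
    simp [Char.isDigit] at h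
    exact ⟨h.1, h.2⟩
  have hc : c = Char.ofNat c.toNat := by rw [Char.ofNat_toNat]
  obtain ⟨ha, hb⟩ := h1
  interval_cases h2 : c.toNat <;> simp [hc]

theorem digit_facts (c : Char) (h : c.isDigit = true) :
    0 ≤ pvCharInt c ∧ pvCharInt c ≤ 9 ∧ PySem.Int.toChars (pvCharInt c) = [c] := by
  have := digit_enum c h
  fin_cases this <;> refine ⟨by decide, by decide, by decide⟩

theorem toChars_digit (v : Int) (h0 : 0 ≤ v) (h9 : v ≤ 9) :
    ∃ c : Char, PySem.Int.toChars v = [c] ∧ c.isDigit = true ∧ pvCharInt c = v := by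
  interval_cases v <;>
    first
      | exact ⟨'0', by decide, by decide, by decide⟩
      | exact ⟨'1', by decide, by decide, by decide⟩
      | exact ⟨'2', by decide, by decide, by decide⟩
      | exact ⟨'3', by decide, by decide, by decide⟩
      | exact ⟨'4', by decide, by decide, by decide⟩
      | exact ⟨'5', by decide, by decide, by decide⟩
      | exact ⟨'6', by decide, by decide, by decide⟩
      | exact ⟨'7', by decide, by decide, by decide⟩
      | exact ⟨'8', by decide, by decide, by decide⟩
      | exact ⟨'9', by decide, by decide, by decide⟩

theorem cell_eq (c : Char) (h : c.isDigit = true) (i : Int) (h0 : 0 ≤ i) (h3 : i ≤ 3) :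
    pvCellA c i = PySem.Int.toChars (pvReduce (pvCharInt c + i + 1)) := by
  obtain ⟨hd0, hd9, -⟩ := digit_facts c h
  set d := pvCharInt c with hd
  unfold pvCellA
  rw [← hd]
  by_cases h9 : d + i + 1 ≤ 9
  · rw [pvReduce_of_le _ h9]
    rw [if_neg (by omega), if_neg (by omega)]
  · rw [pvReduce_of_mid _ (by omega) (by omega)]
    by_cases he : d + i = 9
    · rw [if_pos he]
      have : d + i + 1 - 9 = 1 := by omega
      rw [this]; decide
    · rw [if_neg he, if_pos (by omega)]
      have hm : PySem.Int.mod (d + i) 8 = d + i + 1 - 9 := by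
        rw [PySem.Int.mod_eq_emod_of_pos (by omega)]; omega
      rw [hm]

-- B's cell block: one line of the original grid, incremented by k with the while-reduce rule
def pvCells (line : List Char) (k : Int) : List Char :=
  line.flatMap (fun c => PySem.Int.toChars (pvReduce (pvCharInt c + k)))

theorem cells_congr (line : List Char) (k k' : Int) (h : k = k') :
    pvCells line k = pvCells line k' := by rw [h]

theorem cells_zero (line : List Char) (h : ∀ c ∈ line, c.isDigit = true) :
    pvCells line 0 = line := by
  induction line with
  | nil => rfl
  | cons c cs ih =>
    obtain ⟨-, -, ht⟩ := digit_facts c (h c (by simp))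
    simp only [pvCells, List.flatMap_cons] at *
    rw [add_zero, pvReduce_of_le _ (digit_facts c (h c (by simp))).2.1, ht,
      ih (fun x hx => h x (by simp [hx]))]
    rfl

theorem blockA_eq (line : List Char) (h : ∀ c ∈ line, c.isDigit = true)
    (i : Int) (h0 : 0 ≤ i) (h3 : i ≤ 3) :
    line.flatMap (fun c => pvCellA c i) = pvCells line (i + 1) := by
  unfold pvCells
  induction line with
  | nil => rfl
  | cons c cs ih =>
    simp only [List.flatMap_cons]
    rw [cell_eq c (h c (by simp)) i h0 h3, ih (fun x hx => h x (by simp [hx])), add_assoc]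

theorem cells_digits (line : List Char) (h : ∀ c ∈ line, c.isDigit = true)
    (k : Int) (h0 : 0 ≤ k) (h4 : k ≤ 4) :
    ∀ c ∈ pvCells line k, c.isDigit = true := by
  induction line with
  | nil => intro c hc; simp [pvCells] at hc
  | cons a as ih =>
    intro c hc
    obtain ⟨hd0, hd9, -⟩ := digit_facts a (h a (by simp))
    simp only [pvCells, List.flatMap_cons, List.mem_append] at hc
    rcases hc with hc | hc
    · have hr : 0 ≤ pvReduce (pvCharInt a + k) ∧ pvReduce (pvCharInt a + k) ≤ 9 := by
        by_cases h9 : pvCharInt a + k ≤ 9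
        · rw [pvReduce_of_le _ h9]; omega
        · rw [pvReduce_of_mid _ (by omega) (by omega)]; omega
      obtain ⟨c', he, hdig, -⟩ := toChars_digit _ hr.1 hr.2
      rw [he] at hc
      simp at hc; subst hc; exact hdig
    · exact ih (fun x hx => h x (by simp [hx])) c hc

theorem cells_cells (line : List Char) (h : ∀ c ∈ line, c.isDigit = true)
    (k j : Int) (hk0 : 0 ≤ k) (hk4 : k ≤ 4) (hj0 : 0 ≤ j) (hj4 : j ≤ 4) :
    pvCells (pvCells line k) j = pvCells line (k + j) := by
  induction line with
  | nil => rfl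
  | cons a as ih =>
    obtain ⟨hd0, hd9, -⟩ := digit_facts a (h a (by simp))
    have hr : 0 ≤ pvReduce (pvCharInt a + k) ∧ pvReduce (pvCharInt a + k) ≤ 9 := by
      by_cases h9 : pvCharInt a + k ≤ 9
      · rw [pvReduce_of_le _ h9]; omega
      · rw [pvReduce_of_mid _ (by omega) (by omega)]; omega
    obtain ⟨c', he, -, hci⟩ := toChars_digit _ hr.1 hr.2
    have hred : pvReduce (pvReduce (pvCharInt a + k) + j) = pvReduce (pvCharInt a + k + j) := by
      by_cases h9 : pvCharInt a + k ≤ 9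
      · rw [pvReduce_of_le _ h9]
      · rw [pvReduce_of_mid (pvCharInt a + k) (by omega) (by omega),
          pvReduce_of_le (pvCharInt a + k - 9 + j) (by omega),
          pvReduce_of_mid (pvCharInt a + k + j) (by omega) (by omega)]
        omega
    show pvCells (PySem.Int.toChars (pvReduce (pvCharInt a + k)) ++ pvCells as k) j = _
    rw [he]
    show PySem.Int.toChars (pvReduce (pvCharInt c' + j)) ++ pvCells (pvCells as k) j = _
    rw [hci, hred, ih (fun x hx => h x (by simp [hx]))]
    show _ = PySem.Int.toChars (pvReduce (pvCharInt a + (k + j))) ++ pvCells as (k + j)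
    rw [show pvCharInt a + (k + j) = pvCharInt a + k + j by ring]

theorem rowB_norm (row : List Char) (tr tc k : Int) (h : tr + tc = k) :
    row.flatMap (fun c => PySem.Int.toChars (pvReduce (pvCharInt c + tr + tc))) = pvCells row k := by
  subst h
  simp only [pvCells, add_assoc]

theorem chunk_eq (row : List Char) (h : ∀ c ∈ row, c.isDigit = true) (k i : Int)
    (hk0 : 0 ≤ k) (hk4 : k ≤ 4) (hi0 : 0 ≤ i) (hi3 : i ≤ 3) :
    List.flatMap (fun c => pvCellA c i) (pvCells row k) = pvCells row (k + i + 1) := by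
  rw [blockA_eq _ (cells_digits row h k hk0 hk4) i hi0 hi3,
      cells_cells row h k (i + 1) hk0 hk4 (by omega) (by omega)]
  exact cells_congr _ _ _ (by ring)

theorem rowA0_eq (row : List Char) (h : ∀ c ∈ row, c.isDigit = true) :
    row ++ (row.flatMap (fun c => pvCellA c 0) ++ (row.flatMap (fun c => pvCellA c 1) ++
      (row.flatMap (fun c => pvCellA c 2) ++ row.flatMap (fun c => pvCellA c 3)))) =
    pvCells row 0 ++ (pvCells row 1 ++ (pvCells row 2 ++ (pvCells row 3 ++ pvCells row 4))) := by
  rw [cells_zero row h,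
      blockA_eq row h 0 (by omega) (by omega), blockA_eq row h 1 (by omega) (by omega),
      blockA_eq row h 2 (by omega) (by omega), blockA_eq row h 3 (by omega) (by omega)]
  norm_num

theorem rowA_phase2 (row : List Char) (h : ∀ c ∈ row, c.isDigit = true) (i : Int)
    (hi0 : 0 ≤ i) (hi3 : i ≤ 3) :
    List.flatMap (fun c => pvCellA c i)
      (row ++ (row.flatMap (fun c => pvCellA c 0) ++ (row.flatMap (fun c => pvCellA c 1) ++
        (row.flatMap (fun c => pvCellA c 2) ++ row.flatMap (fun c => pvCellA c 3))))) =
    pvCells row (i + 1) ++ (pvCells row (i + 2) ++ (pvCells row (i + 3) ++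
      (pvCells row (i + 4) ++ pvCells row (i + 5)))) := by
  rw [blockA_eq row h 0 (by omega) (by omega), blockA_eq row h 1 (by omega) (by omega),
      blockA_eq row h 2 (by omega) (by omega), blockA_eq row h 3 (by omega) (by omega)]
  simp only [List.flatMap_append]
  rw [blockA_eq row h i hi0 hi3,
      cells_congr row (0 + 1) 1 (by norm_num), cells_congr row (1 + 1) 2 (by norm_num),
      cells_congr row (2 + 1) 3 (by norm_num), cells_congr row (3 + 1) 4 (by norm_num),
      chunk_eq row h 1 i (by omega) (by omega) hi0 hi3,
      chunk_eq row h 2 i (by omega) (by omega) hi0 hi3,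
      chunk_eq row h 3 i (by omega) (by omega) hi0 hi3,
      chunk_eq row h 4 i (by omega) (by omega) hi0 hi3,
      cells_congr row (1 + i + 1) (i + 2) (by ring),
      cells_congr row (2 + i + 1) (i + 3) (by ring),
      cells_congr row (3 + i + 1) (i + 4) (by ring),
      cells_congr row (4 + i + 1) (i + 5) (by ring)]

-- ===== VERDICT (by name: the statement is the Claim_ definition above) =====
theorem multiply_lines_spec : Claim_equal_multiply_lines := by
  intro lines _hdom hpre
  unfold Pre_multiply_lines at hpre
  have hpre' : ∀ line ∈ lines, ∀ c ∈ line.toList, c.isDigit = true := by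
    intro line hl c hc
    exact List.all_eq_true.mp (List.all_eq_true.mp hpre line hl) c hc
  show multiply_lines lines = multiply_lines_alt lines
  unfold multiply_lines multiply_lines_alt
  rw [show PySem.List.pyRange 0 4 1 = [0,1,2,3] from by decide,
      show PySem.List.pyRange 0 5 1 = [0,1,2,3,4] from by decide]
  simp only [PySem.List.foldl_append_eq_flatMap, List.nil_append, List.flatMap_cons,
    List.flatMap_nil, List.append_nil, ← List.map_eq_flatMap, List.map_map, Function.comp_def,
    String.toList_ofList]
  congr 1
  · refine List.map_congr_left (fun row hrow => ?_)
    have h := fun c hc => hpre' row hrow c hc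
    refine congrArg String.ofList ?_
    rw [rowB_norm row.toList 0 0 0 (by norm_num), rowB_norm row.toList 0 1 1 (by norm_num),
        rowB_norm row.toList 0 2 2 (by norm_num), rowB_norm row.toList 0 3 3 (by norm_num),
        rowB_norm row.toList 0 4 4 (by norm_num)]
    exact rowA0_eq row.toList h
  congr 1
  · refine List.map_congr_left (fun row hrow => ?_)
    have h := fun c hc => hpre' row hrow c hc
    refine congrArg String.ofList ?_
    rw [rowB_norm row.toList 1 0 1 (by norm_num), rowB_norm row.toList 1 1 2 (by norm_num),
        rowB_norm row.toList 1 2 3 (by norm_num), rowB_norm row.toList 1 3 4 (by norm_num),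
        rowB_norm row.toList 1 4 5 (by norm_num)]
    simpa using rowA_phase2 row.toList h 0 (by omega) (by omega)
  congr 1
  · refine List.map_congr_left (fun row hrow => ?_)
    have h := fun c hc => hpre' row hrow c hc
    refine congrArg String.ofList ?_
    rw [rowB_norm row.toList 2 0 2 (by norm_num), rowB_norm row.toList 2 1 3 (by norm_num),
        rowB_norm row.toList 2 2 4 (by norm_num), rowB_norm row.toList 2 3 5 (by norm_num),
        rowB_norm row.toList 2 4 6 (by norm_num)]
    simpa using rowA_phase2 row.toList h 1 (by omega) (by omega)
  congr 1
  · refine List.map_congr_left (fun row hrow => ?_)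
    have h := fun c hc => hpre' row hrow c hc
    refine congrArg String.ofList ?_
    rw [rowB_norm row.toList 3 0 3 (by norm_num), rowB_norm row.toList 3 1 4 (by norm_num),
        rowB_norm row.toList 3 2 5 (by norm_num), rowB_norm row.toList 3 3 6 (by norm_num),
        rowB_norm row.toList 3 4 7 (by norm_num)]
    simpa using rowA_phase2 row.toList h 2 (by omega) (by omega)
  · refine List.map_congr_left (fun row hrow => ?_)
    have h := fun c hc => hpre' row hrow c hc
    refine congrArg String.ofList ?_
    rw [rowB_norm row.toList 4 0 4 (by norm_num), rowB_norm row.toList 4 1 5 (by norm_num),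
        rowB_norm row.toList 4 2 6 (by norm_num), rowB_norm row.toList 4 3 7 (by norm_num),
        rowB_norm row.toList 4 4 8 (by norm_num)]
    simpa using rowA_phase2 row.toList h 3 (by omega) (by omega)
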